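-- pv_equiv track=rewrite | github.com/kadirhanpolat/pytop | src/pytop/separation.py | _finite_regular
-- ===== SOURCE A (Python) =====
-- from typing import Any
--
-- def _finite_closed_sets(opens: list[set[Any]], points: list[Any]) -> list[set[Any]]:
--     carrier = set(points)
--     return [carrier - open_set for open_set in opens]
--
-- def _finite_regular(opens: list[set[Any]], points: list[Any]) -> bool:
--     closed_sets = _finite_closed_sets(opens, points)
--     for x in points:
--         for closed in closed_sets:
--             if x in closed:
--                 continue
--             if not _separate_point_and_closed_set(opens, x, closed):
--                 return False
--     return True
--
-- def _separate_point_and_closed_set(opens: list[set[Any]], point: Any, closed: set[Any]) -> bool: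
--     for point_neighborhood in opens:
--         if point not in point_neighborhood:
--             continue
--         for closed_neighborhood in opens:
--             if closed <= closed_neighborhood and point_neighborhood.isdisjoint(closed_neighborhood):
--                 return True
--     return False
-- ===== SOURCE B (Python) =====
-- def _finite_regular(opens, points):
--     carrier = set(points)
--     closed_sets = [carrier - open_set for open_set in opens]
--     for x in points:
--         seps = None
--         for closed in closed_sets:
--             if x in closed:
--                 continue
--             if seps is None:
--                 nbhds = [u for u in opens if x in u]
--                 seps = [v for v in opens
--                         if any(u.isdisjoint(v) for u in nbhds)]
--             if not any(closed <= v for v in seps):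
--                 return False
--     return True
-- ===== Notes on version B (the rewrite author's own statement) =====
-- stated objective: alternative
-- what changed: Instead of rescanning all opens-by-opens pairs for every (point, closed-set) pair, B lazily computes once per point the family of opens disjoint from some neighborhood of that point and then only subset-tests each closed set against that family; it trades A's repeated pair scan for a cached per-point family.
import Mathlib
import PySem

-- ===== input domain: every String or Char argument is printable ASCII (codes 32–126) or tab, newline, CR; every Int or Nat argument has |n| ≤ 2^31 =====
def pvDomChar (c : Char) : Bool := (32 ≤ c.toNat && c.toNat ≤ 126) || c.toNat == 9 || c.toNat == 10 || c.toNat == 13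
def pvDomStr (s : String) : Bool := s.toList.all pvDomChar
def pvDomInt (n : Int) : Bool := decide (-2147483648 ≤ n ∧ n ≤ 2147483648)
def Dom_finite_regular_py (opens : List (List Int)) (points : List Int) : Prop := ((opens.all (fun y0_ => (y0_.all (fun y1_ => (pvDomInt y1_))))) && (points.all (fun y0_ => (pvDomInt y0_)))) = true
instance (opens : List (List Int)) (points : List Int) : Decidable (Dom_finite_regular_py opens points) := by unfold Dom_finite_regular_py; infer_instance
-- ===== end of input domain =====

-- B restructures A (objective: alternative): per point it lazily computes, once, the family of
-- opens disjoint from some neighborhood of that point, then only subset-tests each closed set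
-- against that cached family instead of rescanning all pairs of opens per closed set.

-- ===== PORT A =====
-- helper _finite_closed_sets
def finite_closed_sets_py (opens : List (List Int)) (points : List Int) : List (List Int) :=
  let carrier := PySem.Set.ofList points
  opens.map (fun open_set => PySem.Set.diff carrier open_set)

-- helper _separate_point_and_closed_set
def separate_point_and_closed_set_py (opens : List (List Int)) (point : Int) (closed : List Int) : Bool :=
  opens.any (fun point_neighborhood =>
    if ¬ (point ∈ point_neighborhood) then false
    else opens.any (fun closed_neighborhood =>
      PySem.Set.issubset closed closed_neighborhood &&
      PySem.Set.isdisjoint point_neighborhood closed_neighborhood))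

def finite_regular_py (opens : List (List Int)) (points : List Int) : Bool :=
  let closed_sets := finite_closed_sets_py opens points
  points.all (fun x =>
    closed_sets.all (fun closed =>
      if x ∈ closed then true
      else separate_point_and_closed_set_py opens x closed))

-- ===== PORT B =====
-- the per-point family B computes lazily: 'seps = [v for v in opens if any(u.isdisjoint(v) for u in nbhds)]'
def alt_seps (opens : List (List Int)) (x : Int) : List (List Int) :=
  let nbhds := opens.filter (fun u => decide (x ∈ u))
  opens.filter (fun v => nbhds.any (fun u => PySem.Set.isdisjoint u v))

-- 'if seps is None: seps = …' — the lazily-initialised value actually used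
def alt_getSeps (opens : List (List Int)) (x : Int) : Option (List (List Int)) → List (List Int)
  | some s => s
  | none => alt_seps opens x

-- the inner 'for closed in closed_sets' loop, carrying the lazily-initialised 'seps' (None = not yet computed)
def alt_inner (opens : List (List Int)) (x : Int) :
    List (List Int) → Option (List (List Int)) → Bool
  | [], _ => true
  | closed :: rest, seps =>
    if x ∈ closed then alt_inner opens x rest seps
    else
      let s := alt_getSeps opens x seps
      if s.any (fun v => PySem.Set.issubset closed v) then
        alt_inner opens x rest (some s)
      else false

def finite_regular_py_alt (opens : List (List Int)) (points : List Int) : Bool :=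
  let carrier := PySem.Set.ofList points
  let closed_sets := opens.map (fun open_set => PySem.Set.diff carrier open_set)
  points.all (fun x => alt_inner opens x closed_sets none)

-- ===== PRECONDITION & SPEC =====
def Spec_finite_regular_py (opens : List (List Int)) (points : List Int) (out : Bool) : Prop := out = finite_regular_py_alt opens points
instance (opens : List (List Int)) (points : List Int) (out : Bool) : Decidable (Spec_finite_regular_py opens points out) := by unfold Spec_finite_regular_py; infer_instance

-- ===== CLAIM (what is proved, stated in full; the proofs are below) =====
def Claim_equal_finite_regular_py : Prop := ∀ (opens : List (List Int)) (points : List Int), Dom_finite_regular_py opens points → Spec_finite_regular_py opens points (finite_regular_py opens points)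

-- ===== LEMMAS AND PROOFS =====

-- A's pairwise rescan for one (point, closed set) equals a subset test against B's family.
lemma sep_eq_seps (opens : List (List Int)) (x : Int) (c : List Int) :
    separate_point_and_closed_set_py opens x c =
      (alt_seps opens x).any (fun v => PySem.Set.issubset c v) := by
  rw [Bool.eq_iff_iff]
  simp [separate_point_and_closed_set_py, alt_seps,
    PySem.Set.issubset_iff, PySem.Set.isdisjoint_iff]
  constructor
  · rintro ⟨u, hu, hx, v, hv, hsub, hdis⟩
    exact ⟨v, hv, ⟨u, hu, hx, hdis⟩, hsub⟩
  · rintro ⟨v, hv, ⟨u, hu, hx, hdis⟩, hsub⟩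
    exact ⟨u, hu, hx, v, hv, hsub, hdis⟩

-- the lazily-carried state is always either 'none' or B's family; the loop computes A's 'all'.
lemma alt_inner_eq (opens : List (List Int)) (x : Int) (cs : List (List Int))
    (seps : Option (List (List Int)))
    (h : seps = none ∨ seps = some (alt_seps opens x)) :
    alt_inner opens x cs seps =
      cs.all (fun c => if x ∈ c then true else separate_point_and_closed_set_py opens x c) := by
  induction cs generalizing seps with
  | nil => rfl
  | cons c rest ih =>
    have hs : alt_getSeps opens x seps = alt_seps opens x := by
      rcases h with h | h <;> simp [h, alt_getSeps]
    by_cases hx : x ∈ c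
    · simp only [alt_inner, List.all_cons, if_pos hx, ih seps h, Bool.true_and]
    · simp only [alt_inner, List.all_cons, if_neg hx, hs, sep_eq_seps]
      by_cases hany : ((alt_seps opens x).any (fun v => PySem.Set.issubset c v)) = true
      · rw [if_pos hany, hany, ih (some (alt_seps opens x)) (Or.inr rfl), Bool.true_and]
        simp only [sep_eq_seps]
      · rw [Bool.not_eq_true] at hany
        simp [hany]

theorem finite_regular_py_eq (opens : List (List Int)) (points : List Int) :
    finite_regular_py opens points = finite_regular_py_alt opens points := by
  simp only [finite_regular_py, finite_regular_py_alt, finite_closed_sets_py]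
  congr 1
  funext x
  exact (alt_inner_eq opens x _ none (Or.inl rfl)).symm

-- ===== VERDICT (by name: the statement is the Claim_ definition above) =====
theorem finite_regular_py_spec : Claim_equal_finite_regular_py := by
  intro opens points _
  exact finite_regular_py_eq opens points
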